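-- pv_equiv track=rewrite | github.com/SamSkjord/tesla-radar | tesla_radar_protocol.py | add_tesla_cksm
-- ===== SOURCE A (Python) =====
-- def add_tesla_cksm(data_low, data_high, msg_id, msg_len):
--     cksm = (0xFF & msg_id) + (0xFF & (msg_id >> 8))
--     for x in range(msg_len):
--         if x <= 3:
--             v = (data_low >> (x * 8)) & 0xFF
--         else:
--             v = (data_high >> ((x - 4) * 8)) & 0xFF
--         cksm = (cksm + v) & 0xFF
--     return cksm
-- ===== SOURCE B (Python) =====
-- def add_tesla_cksm(data_low, data_high, msg_id, msg_len):
--     # Treat the payload as one number and peel its base-256 digits off with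
--     # divmod until it is exhausted (at most msg_len digits); reduce mod 256 once.
--     hi, lo = divmod(msg_id, 256)
--     total = lo + hi % 256
--     t = (data_low & 0xFFFFFFFF) + (data_high << 32)
--     n = msg_len
--     while n > 0 and t:
--         t, b = divmod(t, 256)
--         total += b
--         n -= 1
--     return total % 256
-- ===== Notes on version B (the rewrite author's own statement) =====
-- stated objective: faster
-- what changed: B replaces A's indexed loop over byte positions with a low/high branch and per-step masking by digit-peeling: it maintains one shrinking payload value and repeatedly divmods it by 256, stopping as soon as the value is exhausted, with one final mod 256.
-- intended difference: For msg_len <= 0 when the two low bytes of msg_id sum to 256 or more, A returns that unmasked sum (up to 510, not a byte), while B returns it reduced mod 256, the intended one-byte checksum. — e.g. on add_tesla_cksm(0, 0, 65535, 0): A returns 510, B returns 254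
import Mathlib
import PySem

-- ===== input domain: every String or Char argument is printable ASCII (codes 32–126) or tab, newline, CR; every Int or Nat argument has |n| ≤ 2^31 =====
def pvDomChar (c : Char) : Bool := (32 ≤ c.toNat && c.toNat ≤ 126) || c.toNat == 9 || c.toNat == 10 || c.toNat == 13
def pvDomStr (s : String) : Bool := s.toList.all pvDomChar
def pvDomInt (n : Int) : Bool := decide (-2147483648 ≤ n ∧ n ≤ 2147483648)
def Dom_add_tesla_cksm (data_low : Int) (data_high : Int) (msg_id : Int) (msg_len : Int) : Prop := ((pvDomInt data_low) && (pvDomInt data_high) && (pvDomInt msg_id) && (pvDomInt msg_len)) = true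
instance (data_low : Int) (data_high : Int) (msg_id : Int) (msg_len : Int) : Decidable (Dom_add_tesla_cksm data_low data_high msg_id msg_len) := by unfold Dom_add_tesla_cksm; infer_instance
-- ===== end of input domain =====

-- B peels the payload's base-256 digits off one shrinking value with divmod (no index loop,
-- no low/high branch, one final mod 256); on msg_len ≤ 0 with a two-byte msg_id sum ≥ 256 it
-- returns the intended byte where A returns the unmasked sum (see D_ below).

-- ===== PORT A =====
-- shift amounts x*8 and (x-4)*8 are ≥ 0 for every x the respective branch sees, so .toNat is exact
def add_tesla_cksm (data_low : Int) (data_high : Int) (msg_id : Int) (msg_len : Int) : Int :=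
  let cksm := PySem.Int.band 255 msg_id + PySem.Int.band 255 (msg_id >>> (8:Nat))
  (PySem.List.pyRange 0 msg_len 1).foldl (fun (cksm x : Int) =>
    let v := if x ≤ 3 then PySem.Int.band (data_low >>> (x*8).toNat) 255
             else PySem.Int.band (data_high >>> ((x-4)*8).toNat) 255
    PySem.Int.band (cksm + v) 255) cksm

-- ===== PORT B =====
-- the `while n > 0 and t:` loop of Source B; its state (t, total, n) is carried as arguments.
-- `while t` tests t ≠ 0; the recursion terminates because the counter n strictly decreases.
def pvPeel (t total n : Int) : Int :=
  if 0 < n ∧ t ≠ 0 then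
    pvPeel (PySem.Int.floordiv t 256) (total + PySem.Int.mod t 256) (n - 1)
  else total
termination_by n.toNat
decreasing_by omega

def add_tesla_cksm_alt (data_low : Int) (data_high : Int) (msg_id : Int) (msg_len : Int) : Int :=
  -- divmod(msg_id, 256) with the nonzero literal divisor 256 ported as floordiv / mod
  let hi := PySem.Int.floordiv msg_id 256
  let lo := PySem.Int.mod msg_id 256
  let total := lo + PySem.Int.mod hi 256
  let t := PySem.Int.band data_low 4294967295 + (data_high <<< (32:Nat))
  PySem.Int.mod (pvPeel t total msg_len) 256

-- ===== PRECONDITION & SPEC =====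
-- For msg_len ≤ 0 when the two low bytes of msg_id sum to ≥ 256, A returns that unmasked sum
-- (up to 510, not a byte), while B returns it reduced mod 256, the intended one-byte checksum.
def D_add_tesla_cksm (data_low : Int) (data_high : Int) (msg_id : Int) (msg_len : Int) : Prop :=
  msg_len ≤ 0 ∧ 256 ≤ msg_id % 256 + (msg_id / 256) % 256
instance (data_low : Int) (data_high : Int) (msg_id : Int) (msg_len : Int) : Decidable (D_add_tesla_cksm data_low data_high msg_id msg_len) := by unfold D_add_tesla_cksm; infer_instance

def Spec_add_tesla_cksm (data_low : Int) (data_high : Int) (msg_id : Int) (msg_len : Int) (out : Int) : Prop := ¬ D_add_tesla_cksm data_low data_high msg_id msg_len → out = add_tesla_cksm_alt data_low data_high msg_id msg_len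
instance (data_low : Int) (data_high : Int) (msg_id : Int) (msg_len : Int) (out : Int) : Decidable (Spec_add_tesla_cksm data_low data_high msg_id msg_len out) := by unfold Spec_add_tesla_cksm; infer_instance

def pvDiffWitness_add_tesla_cksm : Int × Int × Int × Int := (0, 0, 65535, 0)
def pvDiffWitnessOut_add_tesla_cksm : Int × Int := (510, 254)

-- ===== CLAIM (what is proved, stated in full; the proofs are below) =====
def Claim_unchanged_add_tesla_cksm : Prop := ∀ (data_low : Int) (data_high : Int) (msg_id : Int) (msg_len : Int), Dom_add_tesla_cksm data_low data_high msg_id msg_len → Spec_add_tesla_cksm data_low data_high msg_id msg_len (add_tesla_cksm data_low data_high msg_id msg_len)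
def Claim_changed_add_tesla_cksm : Prop := Dom_add_tesla_cksm (pvDiffWitness_add_tesla_cksm.1) (pvDiffWitness_add_tesla_cksm.2.1) (pvDiffWitness_add_tesla_cksm.2.2.1) (pvDiffWitness_add_tesla_cksm.2.2.2) ∧ D_add_tesla_cksm (pvDiffWitness_add_tesla_cksm.1) (pvDiffWitness_add_tesla_cksm.2.1) (pvDiffWitness_add_tesla_cksm.2.2.1) (pvDiffWitness_add_tesla_cksm.2.2.2) ∧ add_tesla_cksm (pvDiffWitness_add_tesla_cksm.1) (pvDiffWitness_add_tesla_cksm.2.1) (pvDiffWitness_add_tesla_cksm.2.2.1) (pvDiffWitness_add_tesla_cksm.2.2.2) = pvDiffWitnessOut_add_tesla_cksm.1 ∧ add_tesla_cksm_alt (pvDiffWitness_add_tesla_cksm.1) (pvDiffWitness_add_tesla_cksm.2.1) (pvDiffWitness_add_tesla_cksm.2.2.1) (pvDiffWitness_add_tesla_cksm.2.2.2) = pvDiffWitnessOut_add_tesla_cksm.2 ∧ pvDiffWitnessOut_add_tesla_cksm.1 ≠ pvDiffWitnessOut_add_tesla_cksm.2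
def Claim_exact_add_tesla_cksm : Prop := ∀ (data_low : Int) (data_high : Int) (msg_id : Int) (msg_len : Int), Dom_add_tesla_cksm data_low data_high msg_id msg_len → D_add_tesla_cksm data_low data_high msg_id msg_len → add_tesla_cksm data_low data_high msg_id msg_len ≠ add_tesla_cksm_alt data_low data_high msg_id msg_len

-- ===== LEMMAS AND PROOFS =====

theorem band255 (a : Int) : PySem.Int.band a 255 = a % 256 := by
  unfold PySem.Int.band
  split_ifs with h1 h2 h2
  · rw [show ((255:Int).toNat) = 2^8-1 from rfl, Nat.and_two_pow_sub_one_eq_mod]; omega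
  · omega
  · rw [show ((255:Int).toNat) = 2^8-1 from rfl, Nat.and_comm, Nat.and_two_pow_sub_one_eq_mod]; omega
  · omega

theorem bandMask32 (a : Int) : PySem.Int.band a 4294967295 = a % 4294967296 := by
  unfold PySem.Int.band
  split_ifs with h1 h2 h2
  · rw [show ((4294967295:Int).toNat) = 2^32-1 from rfl, Nat.and_two_pow_sub_one_eq_mod]; omega
  · omega
  · rw [show ((4294967295:Int).toNat) = 2^32-1 from rfl, Nat.and_comm, Nat.and_two_pow_sub_one_eq_mod]; omega
  · omega

-- the merged payload of B, in arithmetic form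
theorem full_eq (dl dh : Int) :
    PySem.Int.band dl 4294967295 + (dh <<< (32:Nat)) = dl % 4294967296 + dh * 4294967296 := by
  rw [bandMask32, Int.shiftLeft_eq]; norm_num

-- the msg_id base in A's orientation of the & masks, in arithmetic form
theorem baseA_eq (mid : Int) :
    PySem.Int.band 255 mid + PySem.Int.band 255 (mid >>> (8:Nat)) = mid % 256 + (mid / 256) % 256 := by
  rw [PySem.Int.band_comm, PySem.Int.band_comm 255, band255, band255, Int.shiftRight_eq_div_pow]
  norm_num

-- byte x (0 ≤ x ≤ 3) of the merged payload is byte x of data_low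
theorem byte_lo (dl dh x : Int) (h0 : 0 ≤ x) (h3 : x ≤ 3) :
    PySem.Int.band ((dl % 4294967296 + dh * 4294967296) >>> (8*x).toNat) 255
      = PySem.Int.band (dl >>> (x*8).toNat) 255 := by
  rw [band255, band255, Int.shiftRight_eq_div_pow, Int.shiftRight_eq_div_pow]
  interval_cases x <;>
    norm_num [show Int.toNat 8 = 8 from rfl, show Int.toNat 16 = 16 from rfl,
              show Int.toNat 24 = 24 from rfl] <;>
    omega

-- byte x (x ≥ 4) of the merged payload is byte x-4 of data_high
theorem byte_hi (dl dh x : Int) (h4 : 4 ≤ x) :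
    PySem.Int.band ((dl % 4294967296 + dh * 4294967296) >>> (8*x).toNat) 255
      = PySem.Int.band (dh >>> ((x-4)*8).toNat) 255 := by
  rw [band255, band255, Int.shiftRight_eq_div_pow, Int.shiftRight_eq_div_pow]
  have hsplit : (8*x).toNat = 32 + ((x-4)*8).toNat := by omega
  rw [hsplit, pow_add]
  push_cast
  rw [← Int.ediv_ediv_of_nonneg (by norm_num : (0:Int) ≤ 4294967296)]
  have : (dl % 4294967296 + dh * 4294967296) / 4294967296 = dh := by omega
  rw [this]

-- A's masked running fold over a nonempty list is one final reduction of the plain sum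
theorem maskFold (v : Int → Int) :
    ∀ (l : List Int) (c : Int), l ≠ [] →
      l.foldl (fun c x => PySem.Int.band (c + v x) 255) c = (c + (l.map v).sum) % 256 := by
  intro l
  induction l with
  | nil => intro c h; exact absurd rfl h
  | cons x t ih =>
    intro c _
    rcases eq_or_ne t [] with ht | ht
    · subst ht; simp [band255]
    · rw [List.foldl_cons, ih _ ht, band255]
      simp only [List.map_cons, List.sum_cons]
      omega

-- the divmod-peeling loop of B computes exactly total + the sum of the first k base-256 digits
theorem peel_eq : ∀ (k : Nat) (t total n : Int), n.toNat = k →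
    pvPeel t total n = total + ((List.range k).map (fun x => t / (256:Int)^x % 256)).sum := by
  intro k
  induction k with
  | zero =>
    intro t total n hn
    rw [pvPeel, if_neg (by omega)]
    simp
  | succ k ih =>
    intro t total n hn
    rcases eq_or_ne t 0 with ht | ht
    · subst ht
      rw [pvPeel, if_neg (by simp)]
      simp
    · rw [pvPeel, if_pos ⟨by omega, ht⟩,
          PySem.Int.floordiv_eq_ediv_of_pos (by norm_num),
          PySem.Int.mod_eq_emod_of_pos (by norm_num),
          ih (t / 256) (total + t % 256) (n - 1) (by omega),
          List.range_succ_eq_map, List.map_cons, List.map_map, List.sum_cons]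
      have hmap : (List.range k).map ((fun x => t / (256:Int)^x % 256) ∘ Nat.succ)
          = (List.range k).map (fun x => t / 256 / (256:Int)^x % 256) := by
        apply List.map_congr_left
        intro x _
        show t / (256:Int) ^ (x+1) % 256 = t / 256 / 256 ^ x % 256
        rw [pow_succ', ← Int.ediv_ediv_of_nonneg (by norm_num : (0:Int) ≤ 256)]
      rw [hmap]
      simp only [pow_zero, Int.ediv_one]
      ring

-- ===== VERDICT (by name: the statement is the Claim_ definition above) =====
theorem add_tesla_cksm_spec : Claim_unchanged_add_tesla_cksm := by
  intro dl dh mid ml _ hnD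
  simp only [add_tesla_cksm, add_tesla_cksm_alt, full_eq, baseA_eq,
             PySem.Int.floordiv_eq_ediv_of_pos (b := 256) (by norm_num),
             PySem.Int.mod_eq_emod_of_pos (b := 256) (by norm_num),
             peel_eq ml.toNat _ _ ml rfl]
  by_cases hml : ml ≤ 0
  · rw [PySem.List.pyRange_one_eq_nil hml]
    simp only [List.foldl_nil]
    have hk : ml.toNat = 0 := by omega
    rw [hk]
    simp only [List.range_zero, List.map_nil, List.sum_nil, add_zero]
    have h1 : 0 ≤ mid % 256 := Int.emod_nonneg _ (by norm_num)
    have h2 : 0 ≤ (mid / 256) % 256 := Int.emod_nonneg _ (by norm_num)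
    have h3 : mid % 256 + (mid / 256) % 256 < 256 := by
      by_contra h
      exact hnD ⟨hml, by omega⟩
    omega
  · have hne : PySem.List.pyRange 0 ml 1 ≠ [] := by
      rw [PySem.List.pyRange_one_cons (by omega : (0:Int) < ml)]; exact List.cons_ne_nil _ _
    rw [maskFold _ _ _ hne]
    have hmap : (PySem.List.pyRange 0 ml 1).map
          (fun (x : Int) => if x ≤ 3 then PySem.Int.band (dl >>> (x*8).toNat) 255
                    else PySem.Int.band (dh >>> ((x-4)*8).toNat) 255)
        = (List.range ml.toNat).map
          (fun x => (dl % 4294967296 + dh * 4294967296) / (256:Int)^x % 256) := by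
      rw [PySem.List.pyRange_one, List.map_map, sub_zero]
      apply List.map_congr_left
      intro k _
      simp only [Function.comp, zero_add]
      have hcast : ((8 * (k:Int)).toNat) = 8 * k := by omega
      have hbyte : PySem.Int.band ((dl % 4294967296 + dh * 4294967296) >>> (8*k : Nat)) 255
          = (dl % 4294967296 + dh * 4294967296) / (256:Int)^k % 256 := by
        rw [band255, Int.shiftRight_eq_div_pow, pow_mul]
        norm_num
      by_cases hk3 : (k:Int) ≤ 3
      · rw [if_pos hk3, ← byte_lo dl dh k (by omega) hk3, hcast, hbyte]
      · rw [if_neg hk3, ← byte_hi dl dh k (by omega), hcast, hbyte]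
    rw [hmap]

theorem add_tesla_cksm_changed : Claim_changed_add_tesla_cksm := by
  unfold Claim_changed_add_tesla_cksm
  refine ⟨by decide, by decide, by decide, ?_, by decide⟩
  show add_tesla_cksm_alt 0 0 65535 0 = 254
  simp only [add_tesla_cksm_alt, peel_eq 0 _ _ 0 rfl]
  decide

theorem add_tesla_cksm_tight : Claim_exact_add_tesla_cksm := by
  intro dl dh mid ml _ hD
  obtain ⟨hml, hsum⟩ := hD
  simp only [add_tesla_cksm, add_tesla_cksm_alt, baseA_eq,
             PySem.Int.floordiv_eq_ediv_of_pos (b := 256) (by norm_num),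
             PySem.Int.mod_eq_emod_of_pos (b := 256) (by norm_num),
             peel_eq ml.toNat _ _ ml rfl,
             PySem.List.pyRange_one_eq_nil hml, List.foldl_nil]
  have hk : ml.toNat = 0 := by omega
  rw [hk]
  simp only [List.range_zero, List.map_nil, List.sum_nil, add_zero]
  have h1 : 0 ≤ mid % 256 := Int.emod_nonneg _ (by norm_num)
  have h2 : 0 ≤ (mid / 256) % 256 := Int.emod_nonneg _ (by norm_num)
  omega
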